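-- pv_equiv track=rewrite | github.com/AleLeeHrtz/Adv-Comp-F2025 | working_with_cfgs/cfg_utils.py | dominators
-- ===== SOURCE A (Python) =====
-- from collections import deque, defaultdict
-- from typing import Dict, List, Set, Tuple
--
-- CFG = Dict[str, List[str]]
--
-- def reachable(cfg: CFG, entry: str) -> Set[str]:
--     vis: Set[str] = set()
--     q = deque([entry])
--     while q:
--         u = q.popleft()
--         if u in vis:
--             continue
--         vis.add(u)
--         for v in cfg.get(u, []):
--             if v not in vis:
--                 q.append(v)
--     return vis
--
-- def preds(cfg: CFG) -> Dict[str, List[str]]: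
--     pr: Dict[str, List[str]] = defaultdict(list)
--     for u, succs in cfg.items():
--         for v in succs:
--             pr[v].append(u)
--     for u in cfg.keys():
--         pr.setdefault(u, pr.get(u, []))
--     return pr
--
-- def dominators(cfg: CFG, entry: str):
--     reach = reachable(cfg, entry)
--     pr = preds(cfg)
--
--     dom = {}
--     for n in reach:
--         if n == entry:
--             dom[n] = {entry}
--         else:
--             dom[n] = set(reach)
--
--     changed = True
--     while changed:
--         changed = False
--         for n in reach:
--             if n == entry:
--                 continue
--             pred_sets = [dom[p] for p in pr.get(n, []) if p in reach]
--             new = set.intersection(*pred_sets) if pred_sets else set()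
--             new.add(n)
--             if new != dom[n]:
--                 dom[n] = new
--                 changed = True
--     return dom
-- ===== SOURCE B (Python) =====
-- from collections import deque
--
-- def _reachable(cfg, entry):
--     vis = set()
--     q = deque([entry])
--     while q:
--         u = q.popleft()
--         if u in vis:
--             continue
--         vis.add(u)
--         for v in cfg.get(u, []):
--             if v not in vis:
--                 q.append(v)
--     return vis
--
-- def _without(cfg, d):
--     return {u: [v for v in succs if v != d] for u, succs in cfg.items() if u != d}
--
-- def dominators(cfg, entry):
--     reach = _reachable(cfg, entry)
--     # d dominates n  iff  d == n or n is unreachable once d is deleted from the graph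
--     avoid = {d: _reachable(_without(cfg, d), entry) for d in reach}
--     return {n: {d for d in reach if d == n or n not in avoid[d]} for n in reach}
-- ===== Notes on version B (the rewrite author's own statement) =====
-- stated objective: faster
-- what changed: Replaces the iterative set-intersection dataflow fixpoint with the path-based definition of dominance: d dominates n iff n becomes unreachable from entry when d is deleted, computed with one BFS per reachable node (no fixpoint iteration, no repeated big set intersections).
import Mathlib
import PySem

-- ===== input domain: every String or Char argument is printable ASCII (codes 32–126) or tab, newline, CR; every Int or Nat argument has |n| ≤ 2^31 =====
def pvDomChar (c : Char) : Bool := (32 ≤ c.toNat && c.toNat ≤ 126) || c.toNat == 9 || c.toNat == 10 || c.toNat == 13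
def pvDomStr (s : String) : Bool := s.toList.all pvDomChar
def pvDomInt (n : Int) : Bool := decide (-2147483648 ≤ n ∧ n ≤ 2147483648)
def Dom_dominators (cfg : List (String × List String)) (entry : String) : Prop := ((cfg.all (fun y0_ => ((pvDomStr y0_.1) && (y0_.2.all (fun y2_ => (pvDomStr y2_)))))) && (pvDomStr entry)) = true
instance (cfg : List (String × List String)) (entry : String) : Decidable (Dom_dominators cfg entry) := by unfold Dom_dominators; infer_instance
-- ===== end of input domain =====

-- B replaces A's iterative set-intersection dataflow fixpoint by the path-based definition of
-- dominance (d dominates n iff n is unreachable from entry once d is deleted), one BFS per node.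
-- Python dicts/sets in the RESULT are compared order-insensitively (sets as finite sets), and
-- Python's iteration order over the set `reach` is hash order, which cannot (and need not) be
-- modelled: both ports iterate `reach` in BFS-discovery order, and every dominator set is
-- materialised as the sublist of `reach` (in `reach` order) holding its elements — a faithful
-- representation of the order-free Python sets, under which Python's set `!=` is list `≠`.

-- ===== PORT A =====
-- shared helper: BFS queue loop of `reachable` (both Pythons contain the identical function).
-- The fuel 1 + (total length of all successor lists) is proved sufficient below
-- (each iteration strictly decreases queue length + out-degrees of unvisited keys).
def pvEdgeWeight (items : List (String × List String)) (vis : List String) : Nat :=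
  ((items.filter (fun p => !(vis.contains p.1))).map (fun p => p.2.length)).sum

def pvBfs (cfgd : PySem.Dict String (List String)) :
    Nat → List String → PySem.Set String → PySem.Set String
  | 0, _, vis => vis
  | _ + 1, [], vis => vis
  | fuel + 1, u :: q, vis =>
    if vis.contains u then pvBfs cfgd fuel q vis
    else
      let vis' := PySem.Set.add vis u
      pvBfs cfgd fuel (q ++ (cfgd.getD u []).filter (fun v => !vis'.contains v)) vis'

def reachableD (cfgd : PySem.Dict String (List String)) (entry : String) : PySem.Set String :=
  pvBfs cfgd (1 + pvEdgeWeight cfgd.items []) [entry] []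

-- preds: pr = defaultdict(list); for u, succs in cfg.items(): for v in succs: pr[v].append(u);
-- then the setdefault loop.
def predsD (cfgd : PySem.Dict String (List String)) : PySem.Dict String (List String) :=
  let pr := cfgd.items.foldl
    (fun pr p => p.2.foldl (fun pr v => pr.modify v [] (· ++ [p.1])) pr)
    PySem.Dict.empty
  cfgd.items.foldl (fun pr p => pr.setdefault p.1 []) pr

-- new = set.intersection(*pred_sets) if pred_sets else set(); new.add(n) —
-- materialised in `reach` order (Python sets are order-free).
def pvNewDom (reach : List String) (predsn : List String)
    (dom : PySem.Dict String (List String)) (n : String) : List String :=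
  if predsn.isEmpty then [n]
  else reach.filter (fun x => x == n || predsn.all (fun p => ((dom.getD p []).contains x)))

-- one iteration of `for n in reach: …` body (acc = (dom, changed))
def pvStep (reach : List String) (entry : String) (pr : PySem.Dict String (List String))
    (acc : PySem.Dict String (List String) × Bool) (n : String) :
    PySem.Dict String (List String) × Bool :=
  if n == entry then acc
  else
    let predsn := (pr.getD n []).filter (fun p => reach.contains p)
    let new := pvNewDom reach predsn acc.1 n
    if acc.1.getD n [] == new then acc else (acc.1.insert n new, true)

-- while changed: … — fuel |reach|^2 + 1 passes is proved sufficient below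
-- (each changing pass strictly decreases the total size of the dominator sets).
def pvLoop (reach : List String) (entry : String) (pr : PySem.Dict String (List String)) :
    Nat → PySem.Dict String (List String) → PySem.Dict String (List String)
  | 0, dom => dom
  | fuel + 1, dom =>
    let st := reach.foldl (pvStep reach entry pr) (dom, false)
    if st.2 then pvLoop reach entry pr fuel st.1 else st.1

def dominators (cfg : List (String × List String)) (entry : String) : List (String × List String) :=
  let cfgd := PySem.Dict.ofList cfg
  let reach := reachableD cfgd entry
  let pr := predsD cfgd
  let dom0 := reach.foldl
    (fun d n => d.insert n (if n == entry then [entry] else reach)) PySem.Dict.empty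
  (pvLoop reach entry pr (reach.length * reach.length + 1) dom0).items

-- ===== PORT B =====
-- _without(cfg, d): a dict comprehension over the (nodup-key) items of cfg; the transformed
-- items list again has nodup keys, so building the Dict directly from it is that comprehension.
def withoutD (cfgd : PySem.Dict String (List String)) (d : String) :
    PySem.Dict String (List String) :=
  PySem.Dict.mk ((cfgd.items.filter (fun p => !(p.1 == d))).map
    (fun p => (p.1, p.2.filter (fun v => !(v == d)))))

def dominators_alt (cfg : List (String × List String)) (entry : String) :
    List (String × List String) :=
  let cfgd := PySem.Dict.ofList cfg
  let reach := reachableD cfgd entry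
  let avoid := reach.foldl
    (fun a d => a.insert d (reachableD (withoutD cfgd d) entry)) PySem.Dict.empty
  (reach.foldl
    (fun dm n =>
      dm.insert n (reach.filter (fun d => d == n || !((avoid.getD d []).contains n))))
    PySem.Dict.empty).items

-- ===== PRECONDITION & SPEC =====
def Spec_dominators (cfg : List (String × List String)) (entry : String) (out : List (String × List String)) : Prop := out = dominators_alt cfg entry
instance (cfg : List (String × List String)) (entry : String) (out : List (String × List String)) : Decidable (Spec_dominators cfg entry out) := by unfold Spec_dominators; infer_instance

-- ===== CLAIM (what is proved, stated in full; the proofs are below) =====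
def Claim_equal_dominators : Prop := ∀ (cfg : List (String × List String)) (entry : String), Dom_dominators cfg entry → Spec_dominators cfg entry (dominators cfg entry)

-- ===== LEMMAS AND PROOFS =====

-- edge relation of a cfg dict, and reachability as its reflexive-transitive closure
def EdgeG (cfgd : PySem.Dict String (List String)) (u v : String) : Prop :=
  v ∈ cfgd.getD u []

-- ---------- BFS fuel bookkeeping ----------
lemma ew_mono (items : List (String × List String)) (vis : List String) (u : String) :
    pvEdgeWeight items (vis ++ [u]) ≤ pvEdgeWeight items vis := by
  unfold pvEdgeWeight
  refine List.Sublist.sum_le_sum ?_ (fun a _ => Nat.zero_le a)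
  refine List.Sublist.map _ ?_
  refine List.monotone_filter_right _ ?_
  intro p hp
  simp only [Bool.not_eq_eq_eq_not, Bool.not_true] at hp ⊢
  simp only [List.contains_eq_mem, decide_eq_false_iff_not] at hp ⊢
  intro hmem; exact hp (List.mem_append_left _ hmem)

lemma ew_cons (p : String × List String) (items : List (String × List String))
    (vis : List String) :
    pvEdgeWeight (p :: items) vis =
      (if vis.contains p.1 then 0 else p.2.length) + pvEdgeWeight items vis := by
  unfold pvEdgeWeight
  by_cases h : p.1 ∈ vis <;> simp [List.filter_cons, h]

lemma ew_drop (items : List (String × List String)) (vis : List String) {u : String}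
    {s : List String} (hmem : (u, s) ∈ items) (hk : (items.map Prod.fst).Nodup)
    (hu : u ∉ vis) :
    pvEdgeWeight items (vis ++ [u]) + s.length ≤ pvEdgeWeight items vis := by
  induction items with
  | nil => simp at hmem
  | cons p t ih =>
    rw [ew_cons, ew_cons]
    rcases List.mem_cons.1 hmem with heq | htail
    · subst heq
      have h1 : u ∈ vis ++ [u] := by simp
      have h2 : u ∉ vis := hu
      rw [if_pos (by simpa using h1), if_neg (by simpa using h2)]
      have hsnd : (((u : String), s)).2 = s := rfl
      rw [hsnd]
      have := ew_mono t vis u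
      omega
    · have hk' : (t.map Prod.fst).Nodup := (List.nodup_cons.1 hk).2
      have hne : p.1 ≠ u := by
        intro h
        exact (List.nodup_cons.1 hk).1 (h ▸ List.mem_map_of_mem htail)
      have hc : ((vis ++ [u]).contains p.1) = (vis.contains p.1) := by
        simp only [List.contains_eq_mem, List.mem_append, List.mem_singleton]
        by_cases h : p.1 ∈ vis <;> simp [h, hne]
      rw [hc]
      have := ih htail hk'
      by_cases h : vis.contains p.1 = true
      · rw [if_pos h]; omega
      · rw [if_neg h]; omega

-- ---------- BFS correctness ----------
lemma bfs_spec (cfgd : PySem.Dict String (List String)) (hk : cfgd.keys.Nodup) :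
    ∀ (fuel : Nat) (q vis : List String),
      q.length + pvEdgeWeight cfgd.items vis ≤ fuel →
      vis.Nodup →
      (∀ u ∈ vis, ∀ v ∈ cfgd.getD u [], v ∈ vis ∨ v ∈ q) →
      (∀ x ∈ vis, x ∈ pvBfs cfgd fuel q vis) ∧
      (∀ x ∈ q, x ∈ pvBfs cfgd fuel q vis) ∧
      (pvBfs cfgd fuel q vis).Nodup ∧
      (∀ u ∈ pvBfs cfgd fuel q vis, ∀ v ∈ cfgd.getD u [], v ∈ pvBfs cfgd fuel q vis) ∧
      (∀ x ∈ pvBfs cfgd fuel q vis,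
        x ∈ vis ∨ ∃ u ∈ q, Relation.ReflTransGen (EdgeG cfgd) u x) := by
  intro fuel
  induction fuel with
  | zero =>
    intro q vis hf hnd hI2
    have hq : q = [] := List.length_eq_zero_iff.1 (by omega)
    subst hq
    refine ⟨fun x hx => hx, by simp, hnd, ?_, fun x hx => Or.inl hx⟩
    intro u hu v hv
    rcases hI2 u hu v hv with h | h
    · exact h
    · simp at h
  | succ f ih =>
    intro q vis hf hnd hI2
    cases q with
    | nil =>
      refine ⟨fun x hx => hx, by simp, hnd, ?_, fun x hx => Or.inl hx⟩
      intro u hu v hv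
      rcases hI2 u hu v hv with h | h
      · exact h
      · simp at h
    | cons u q =>
      by_cases hu : PySem.Set.contains vis u = true
      · have hbfs : pvBfs cfgd (f + 1) (u :: q) vis = pvBfs cfgd f q vis := by
          simp only [pvBfs]
          rw [if_pos hu]
        have humem : u ∈ vis := (PySem.Set.contains_iff vis u).1 hu
        have hf' : q.length + pvEdgeWeight cfgd.items vis ≤ f := by
          simp only [List.length_cons] at hf; omega
        have hI2' : ∀ w ∈ vis, ∀ v ∈ cfgd.getD w [], v ∈ vis ∨ v ∈ q := by
          intro w hw v hv
          rcases hI2 w hw v hv with h | h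
          · exact Or.inl h
          · rcases List.mem_cons.1 h with rfl | h2
            · exact Or.inl humem
            · exact Or.inr h2
        obtain ⟨hA, hB, hN, hC, hS⟩ := ih q vis hf' hnd hI2'
        rw [hbfs]
        refine ⟨hA, ?_, hN, hC, ?_⟩
        · intro x hx
          rcases List.mem_cons.1 hx with rfl | h2
          · exact hA x humem
          · exact hB x h2
        · intro x hx
          rcases hS x hx with h | ⟨w, hw, hr⟩
          · exact Or.inl h
          · exact Or.inr ⟨w, List.mem_cons_of_mem u hw, hr⟩
      · have humem : u ∉ vis := fun hmem => hu ((PySem.Set.contains_iff vis u).2 hmem)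
        have hadd : PySem.Set.add vis u = vis ++ [u] := PySem.Set.add_of_not_mem humem
        have hbfs : pvBfs cfgd (f + 1) (u :: q) vis =
            pvBfs cfgd f
              (q ++ (cfgd.getD u []).filter (fun v => !PySem.Set.contains (vis ++ [u]) v))
              (vis ++ [u]) := by
          simp only [pvBfs]
          rw [if_neg hu, hadd]
        rw [hbfs]
        set filt := (cfgd.getD u []).filter (fun v => !PySem.Set.contains (vis ++ [u]) v)
          with hfiltdef
        have hfiltlen : filt.length ≤ (cfgd.getD u []).length := List.length_filter_le _ _
        have hkeq : cfgd.keys = cfgd.items.map Prod.fst := rfl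
        have hf' : (q ++ filt).length + pvEdgeWeight cfgd.items (vis ++ [u]) ≤ f := by
          by_cases hkey : cfgd.contains u = true
          · cases hget : cfgd.get? u with
            | none =>
              exfalso
              have := (PySem.Dict.get?_eq_none_iff_contains cfgd u).1 hget
              rw [hkey] at this
              simp at this
            | some sl =>
              have hmemitems : (u, sl) ∈ cfgd.items :=
                (PySem.Dict.get?_eq_some_iff_mem_items cfgd u sl hk).1 hget
              have hgetD : cfgd.getD u [] = sl := by
                rw [PySem.Dict.getD_eq_get?_getD, hget]
                rfl
              have hdrop := ew_drop cfgd.items vis hmemitems (hkeq ▸ hk) humem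
              rw [hgetD] at hfiltlen
              simp only [List.length_append, List.length_cons] at hf ⊢
              omega
          · have hgetD : cfgd.getD u [] = [] :=
              PySem.Dict.getD_of_not_contains cfgd [] (by simpa using hkey)
            rw [hgetD] at hfiltlen
            simp only [List.length_nil] at hfiltlen
            have hmono := ew_mono cfgd.items vis u
            simp only [List.length_append, List.length_cons] at hf ⊢
            omega
        have hnd' : (vis ++ [u]).Nodup := by
          rw [List.nodup_append]
          refine ⟨hnd, List.nodup_singleton u, fun a ha b hb heq => ?_⟩
          have hbu : b = u := by simpa using hb
          exact humem (hbu ▸ heq ▸ ha)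
        have hI2' : ∀ w ∈ vis ++ [u], ∀ v ∈ cfgd.getD w [], v ∈ vis ++ [u] ∨ v ∈ q ++ filt := by
          intro w hw v hv
          rcases List.mem_append.1 hw with hwv | hwu
          · rcases hI2 w hwv v hv with h | h
            · exact Or.inl (List.mem_append_left _ h)
            · rcases List.mem_cons.1 h with rfl | h2
              · exact Or.inl (List.mem_append_right _ (List.mem_singleton_self _))
              · exact Or.inr (List.mem_append_left _ h2)
          · have hwu' : w = u := by simpa using hwu
            rw [hwu'] at hv
            by_cases hvmem : v ∈ vis ++ [u]
            · exact Or.inl hvmem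
            · refine Or.inr (List.mem_append_right _ ?_)
              rw [hfiltdef]
              refine List.mem_filter.2 ⟨hv, ?_⟩
              simp only [Bool.not_eq_eq_eq_not, Bool.not_true]
              rw [← Bool.not_eq_true]
              intro hc
              exact hvmem ((PySem.Set.contains_iff _ _).1 hc)
        obtain ⟨hA, hB, hN, hC, hS⟩ := ih (q ++ filt) (vis ++ [u]) hf' hnd' hI2'
        refine ⟨?_, ?_, hN, hC, ?_⟩
        · intro x hx
          exact hA x (List.mem_append_left _ hx)
        · intro x hx
          rcases List.mem_cons.1 hx with rfl | h2
          · exact hA x (List.mem_append_right _ (List.mem_singleton_self _))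
          · exact hB x (List.mem_append_left _ h2)
        · intro x hx
          rcases hS x hx with h | ⟨w, hw, hr⟩
          · rcases List.mem_append.1 h with h1 | h1
            · exact Or.inl h1
            · have : x = u := by simpa using h1
              subst this
              exact Or.inr ⟨x, List.mem_cons_self, Relation.ReflTransGen.refl⟩
          · rcases List.mem_append.1 hw with h1 | h1
            · exact Or.inr ⟨w, List.mem_cons_of_mem u h1, hr⟩
            · have hwedge : w ∈ cfgd.getD u [] := (List.mem_filter.1 h1).1
              exact Or.inr ⟨u, List.mem_cons_self, Relation.ReflTransGen.head hwedge hr⟩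

lemma reachableD_spec (cfgd : PySem.Dict String (List String)) (hk : cfgd.keys.Nodup)
    (entry : String) :
    (∀ x, x ∈ reachableD cfgd entry ↔ Relation.ReflTransGen (EdgeG cfgd) entry x) ∧
    (reachableD cfgd entry).Nodup ∧ entry ∈ reachableD cfgd entry := by
  have h := bfs_spec cfgd hk (1 + pvEdgeWeight cfgd.items []) [entry] []
    (by simp) (by simp) (by simp)
  obtain ⟨hA, hB, hN, hC, hS⟩ := h
  have hentry : entry ∈ reachableD cfgd entry := hB entry (List.mem_singleton_self _)
  refine ⟨?_, hN, hentry⟩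
  intro x
  constructor
  · intro hx
    rcases hS x hx with h0 | ⟨w, hw, hr⟩
    · simp at h0
    · have : w = entry := by simpa using hw
      exact this ▸ hr
  · intro hr
    induction hr with
    | refl => exact hentry
    | tail hab hbc ih => exact hC _ ih _ hbc

lemma mem_reachableD (cfgd : PySem.Dict String (List String)) (hk : cfgd.keys.Nodup)
    (entry x : String) :
    x ∈ reachableD cfgd entry ↔ Relation.ReflTransGen (EdgeG cfgd) entry x :=
  (reachableD_spec cfgd hk entry).1 x

lemma nodup_reachableD (cfgd : PySem.Dict String (List String)) (hk : cfgd.keys.Nodup)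
    (entry : String) : (reachableD cfgd entry).Nodup :=
  (reachableD_spec cfgd hk entry).2.1

lemma entry_mem_reachableD (cfgd : PySem.Dict String (List String)) (hk : cfgd.keys.Nodup)
    (entry : String) : entry ∈ reachableD cfgd entry :=
  (reachableD_spec cfgd hk entry).2.2

-- ---------- preds characterisation ----------
lemma setdefault_getD_nil (d : PySem.Dict String (List String)) (k n : String) :
    (d.setdefault k []).getD n [] = d.getD n [] := by
  unfold PySem.Dict.setdefault
  by_cases hc : d.contains k = true
  · rw [if_pos hc]
  · rw [if_neg hc]
    show (Option.map Prod.snd (List.find? (fun p => p.1 == n) (d.items ++ [(k, [])]))).getD []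
      = d.getD n []
    rw [List.find?_append]
    cases hfind : List.find? (fun p => p.1 == n) d.items with
    | some p => simp [PySem.Dict.getD, PySem.Dict.get?, hfind]
    | none =>
      by_cases hkn : (k == n) = true
      · simp [Option.orElse, List.find?, hkn, PySem.Dict.getD, PySem.Dict.get?, hfind]
      · simp [Option.orElse, List.find?, hkn, PySem.Dict.getD, PySem.Dict.get?, hfind]

lemma foldl_nested_modify :
    ∀ (l : List (String × List String)) (init : PySem.Dict String (List String)),
      l.foldl (fun pr p => p.2.foldl (fun pr v => pr.modify v [] (· ++ [p.1])) pr) init =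
        (l.flatMap (fun p => p.2.map (fun v => (v, p.1)))).foldl
          (fun d q => d.modify q.1 [] (· ++ [q.2])) init := by
  intro l
  induction l with
  | nil => intro init; simp
  | cons p t ih =>
    intro init
    rw [List.flatMap_cons, List.foldl_append, List.foldl_cons, ih]
    congr 1
    rw [List.foldl_map]

lemma setdefault_fold_getD_nil (l : List (String × List String))
    (d : PySem.Dict String (List String)) (n : String) :
    (l.foldl (fun pr p => pr.setdefault p.1 []) d).getD n [] = d.getD n [] := by
  induction l generalizing d with
  | nil => rfl
  | cons p t ih => rw [List.foldl_cons, ih, setdefault_getD_nil]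

lemma mem_predsD_getD (cfgd : PySem.Dict String (List String)) (hk : cfgd.keys.Nodup)
    (u n : String) :
    u ∈ (predsD cfgd).getD n [] ↔ n ∈ cfgd.getD u [] := by
  unfold predsD
  rw [setdefault_fold_getD_nil, foldl_nested_modify,
    PySem.Dict.getD_foldl_modify_append]
  rw [show PySem.Dict.empty.getD n ([] : List String) = [] from rfl]
  rw [List.nil_append]
  simp only [List.mem_map, List.mem_filter, List.mem_flatMap, beq_iff_eq]
  constructor
  · rintro ⟨a, ⟨⟨p, hp, v', hv', rfl⟩, ha1⟩, ha2⟩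
    simp only at ha1 ha2
    subst ha1
    rcases p with ⟨pk, pv⟩
    simp only at ha2 hv'
    subst ha2
    rw [PySem.Dict.getD_of_mem_items cfgd hp hk []]
    exact hv'
  · intro hmem
    have hcontains : cfgd.getD u [] ≠ [] := by
      intro h; rw [h] at hmem; simp at hmem
    have hget : cfgd.get? u = some (cfgd.getD u []) := by
      cases hq : cfgd.get? u with
      | none =>
        exfalso; apply hcontains
        rw [PySem.Dict.getD_eq_get?_getD, hq]
        rfl
      | some s =>
        rw [PySem.Dict.getD_eq_get?_getD, hq]
        rfl
    have hitems : (u, cfgd.getD u []) ∈ cfgd.items :=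
      (PySem.Dict.get?_eq_some_iff_mem_items cfgd u _ hk).1 hget
    exact ⟨(n, u), ⟨⟨(u, cfgd.getD u []), hitems, n, hmem, rfl⟩, rfl⟩, rfl⟩

-- ---------- without characterisation ----------
lemma get?_withoutD (cfgd : PySem.Dict String (List String)) (d u : String) :
    (withoutD cfgd d).get? u =
      if u = d then none
      else (cfgd.get? u).map (fun s => s.filter (fun v => !(v == d))) := by
  rcases cfgd with ⟨l⟩
  show (PySem.Dict.mk ((l.filter (fun p => !(p.1 == d))).map
      (fun p => (p.1, p.2.filter (fun v => !(v == d)))))).get? u = _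
  induction l with
  | nil => by_cases h : u = d <;> simp [PySem.Dict.get?, h]
  | cons p t ih =>
    by_cases hpd : p.1 = d
    · have hfilter : ((p :: t).filter (fun p => !(p.1 == d))) =
          t.filter (fun p => !(p.1 == d)) := by
        simp [List.filter_cons, hpd]
      rw [hfilter, ih]
      by_cases hud : u = d
      · simp [hud]
      · have hpu : ¬(p.1 == u) = true := by simp [hpd]; intro h; exact hud (h ▸ hpd ▸ rfl)
        rw [if_neg hud, if_neg hud]
        show Option.map _ ((PySem.Dict.mk t).get? u) = Option.map _ ((PySem.Dict.mk (p :: t)).get? u)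
        rw [PySem.Dict.get?_mk_cons, if_neg hpu]
    · have hfilter : ((p :: t).filter (fun p => !(p.1 == d))) =
          p :: t.filter (fun p => !(p.1 == d)) := by
        simp [List.filter_cons, hpd]
      rw [hfilter, List.map_cons, PySem.Dict.get?_mk_cons]
      by_cases hpu : p.1 = u
      · have hud : u ≠ d := fun h => hpd (hpu.trans h)
        rw [if_pos (by simpa using hpu), if_neg hud]
        show _ = Option.map _ ((PySem.Dict.mk (p :: t)).get? u)
        rw [PySem.Dict.get?_mk_cons, if_pos (by simpa using hpu)]
        rfl
      · rw [if_neg (by simpa using hpu), ih]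
        by_cases hud : u = d
        · simp [hud]
        · rw [if_neg hud, if_neg hud]
          show Option.map _ ((PySem.Dict.mk t).get? u) = Option.map _ ((PySem.Dict.mk (p :: t)).get? u)
          rw [PySem.Dict.get?_mk_cons, if_neg (by simpa using hpu)]

lemma keys_nodup_withoutD (cfgd : PySem.Dict String (List String)) (hk : cfgd.keys.Nodup)
    (d : String) : (withoutD cfgd d).keys.Nodup := by
  have hkeys : (withoutD cfgd d).keys =
      (cfgd.items.filter (fun p => !(p.1 == d))).map Prod.fst := by
    show ((cfgd.items.filter (fun p => !(p.1 == d))).map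
      (fun p => (p.1, p.2.filter (fun v => !(v == d))))).map Prod.fst = _
    rw [List.map_map]
    rfl
  rw [hkeys]
  have hsub : ((cfgd.items.filter (fun p => !(p.1 == d))).map Prod.fst).Sublist
      (cfgd.items.map Prod.fst) := List.Sublist.map Prod.fst (List.filter_sublist)
  exact hk.sublist hsub

lemma edge_withoutD (cfgd : PySem.Dict String (List String)) (d u v : String) :
    EdgeG (withoutD cfgd d) u v ↔ u ≠ d ∧ v ≠ d ∧ EdgeG cfgd u v := by
  unfold EdgeG
  rw [PySem.Dict.getD_eq_get?_getD, get?_withoutD]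
  by_cases hud : u = d
  · simp [hud]
  · rw [if_neg hud]
    rw [PySem.Dict.getD_eq_get?_getD]
    cases hq : cfgd.get? u with
    | none => simp
    | some s => simp [List.mem_filter, hud, and_comm]

lemma rtg_withoutD_mono (cfgd : PySem.Dict String (List String)) (d a b : String) :
    Relation.ReflTransGen (EdgeG (withoutD cfgd d)) a b →
    Relation.ReflTransGen (EdgeG cfgd) a b := by
  exact Relation.ReflTransGen.mono
    (fun x y h => ((edge_withoutD cfgd d x y).1 h).2.2)

-- ---------- the path-based dominance predicate P ----------
def PD (cfgd : PySem.Dict String (List String)) (entry n x : String) : Prop :=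
  x ∈ reachableD cfgd entry ∧ (x = n ∨ n ∉ reachableD (withoutD cfgd x) entry)

lemma PD_entry_iff (cfgd : PySem.Dict String (List String)) (hk : cfgd.keys.Nodup)
    (entry x : String) : PD cfgd entry entry x ↔ x = entry := by
  constructor
  · rintro ⟨hx, h | h⟩
    · exact h
    · exact absurd (entry_mem_reachableD _ (keys_nodup_withoutD cfgd hk x) entry) h
  · rintro rfl
    exact ⟨entry_mem_reachableD cfgd hk _, Or.inl rfl⟩

lemma PD_self (cfgd : PySem.Dict String (List String)) (hk : cfgd.keys.Nodup)
    (entry n : String) (hn : n ∈ reachableD cfgd entry) : PD cfgd entry n n :=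
  ⟨hn, Or.inl rfl⟩

lemma PD_pred (cfgd : PySem.Dict String (List String)) (hk : cfgd.keys.Nodup)
    (entry n x p : String) (hx : PD cfgd entry n x) (hxn : x ≠ n)
    (hpn : EdgeG cfgd p n) (hp : p ∈ reachableD cfgd entry) : PD cfgd entry p x := by
  obtain ⟨hxr, hor⟩ := hx
  refine ⟨hxr, ?_⟩
  by_cases hxp : x = p
  · exact Or.inl hxp
  · refine Or.inr ?_
    intro hpmem
    have hnra : n ∉ reachableD (withoutD cfgd x) entry := by
      rcases hor with h | h
      · exact absurd h hxn
      · exact h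
    apply hnra
    rw [mem_reachableD _ (keys_nodup_withoutD cfgd hk x)]
    rw [mem_reachableD _ (keys_nodup_withoutD cfgd hk x)] at hpmem
    refine hpmem.tail ?_
    rw [edge_withoutD]
    exact ⟨fun h => hxp h.symm, fun h => hxn h.symm, hpn⟩

-- every fixpoint of the dataflow equations lies (pointwise) below P
lemma below_P (cfgd : PySem.Dict String (List String)) (hk : cfgd.keys.Nodup)
    (entry x : String) (X : String → List String)
    (hXe : ∀ y, y ∈ X entry → y = entry)
    (hXfix : ∀ n, n ∈ reachableD cfgd entry → n ≠ entry → ∀ y, y ∈ X n →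
      y = n ∨ (∀ p, EdgeG cfgd p n → p ∈ reachableD cfgd entry → y ∈ X p)) :
    ∀ m, Relation.ReflTransGen (EdgeG (withoutD cfgd x)) entry m →
      m ∈ reachableD cfgd entry → x ∈ X m → x = m := by
  intro m hm
  induction hm with
  | refl =>
    intro _ hx
    exact hXe x hx
  | tail hab hbc ih =>
    rename_i b c
    intro hcr hxc
    have hbedge := (edge_withoutD cfgd x b c).1 hbc
    have hbr : b ∈ reachableD cfgd entry := by
      rw [mem_reachableD cfgd hk]
      exact rtg_withoutD_mono cfgd x entry b hab
    by_cases hce : c = entry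
    · subst hce
      exact hXe x hxc
    · rcases hXfix c hcr hce x hxc with h | h
      · exact h
      · have hxb : x ∈ X b := h b hbedge.2.2 hbr
        have := ih hbr hxb
        exact absurd this.symm hbedge.1

-- ---------- canonical representation of dominator sets ----------
def Canon (reach l : List String) : Prop :=
  reach.filter (fun x => l.contains x) = l

lemma canon_filter (reach : List String) (p : String → Bool) :
    Canon reach (reach.filter p) := by
  unfold Canon
  apply List.filter_congr
  intro x hx
  by_cases hp : p x = true <;> simp [hp, List.mem_filter, hx]

lemma filter_beq_nodup (reach : List String) (hnd : reach.Nodup) {n : String}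
    (hn : n ∈ reach) : reach.filter (fun x => x == n) = [n] := by
  induction reach with
  | nil => simp at hn
  | cons a t ih =>
    rcases List.nodup_cons.1 hnd with ⟨ha, hndt⟩
    by_cases heq : a = n
    · subst heq
      have ht : t.filter (fun x => x == a) = [] := by
        apply List.filter_eq_nil_iff.2
        intro x hx
        simp only [beq_iff_eq]
        intro h; exact ha (h ▸ hx)
      simp [List.filter_cons, ht]
    · have hn' : n ∈ t := by
        rcases List.mem_cons.1 hn with h | h
        · exact absurd h.symm heq
        · exact h
      have hne : ¬((a == n) = true) := by simpa using heq
      simp [List.filter_cons, hne, ih hndt hn']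

lemma canon_singleton (reach : List String) (hnd : reach.Nodup) {n : String}
    (hn : n ∈ reach) : Canon reach [n] := by
  unfold Canon
  have : reach.filter (fun x => [n].contains x) = reach.filter (fun x => x == n) := by
    apply List.filter_congr
    intro x _
    rcases eq_or_ne x n with h | h <;> simp [h]
  rw [this, filter_beq_nodup reach hnd hn]

lemma canon_self (reach : List String) : Canon reach reach := by
  unfold Canon
  rw [List.filter_eq_self]
  intro x hx; simpa using hx

lemma canon_mem (reach l : List String) (h : Canon reach l) {x : String} (hx : x ∈ l) :
    x ∈ reach := by
  rw [← h] at hx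
  exact (List.mem_filter.1 hx).1

lemma canon_eq_of_mem_iff (reach l l' : List String) (h : Canon reach l) (h' : Canon reach l')
    (hm : ∀ x, x ∈ l ↔ x ∈ l') : l = l' := by
  rw [← h, ← h']
  apply List.filter_congr
  intro x _
  by_cases hx : x ∈ l
  · simp [hx, (hm x).1 hx]
  · have hx' : x ∉ l' := fun hc => hx ((hm x).2 hc)
    simp [hx, hx']

lemma filter_length_lt (r : List String) (p q : String → Bool)
    (hpq : ∀ a, p a = true → q a = true) {w : String} (hw : w ∈ r)
    (hq : q w = true) (hp : p w = false) :
    (r.filter p).length < (r.filter q).length := by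
  induction r with
  | nil => simp at hw
  | cons a t ih =>
    have hmono : (t.filter p).length ≤ (t.filter q).length :=
      (List.monotone_filter_right t hpq).length_le
    rcases List.mem_cons.1 hw with heq | htail
    · subst heq
      rw [List.filter_cons, List.filter_cons, hp, hq]
      simpa using Nat.lt_succ_of_le hmono
    · have hlt := ih htail
      by_cases hpa : p a = true
      · have hqa := hpq a hpa
        rw [List.filter_cons, List.filter_cons, hpa, hqa]
        simpa using hlt
      · have hpa' : p a = false := by simpa using hpa
        by_cases hqa : q a = true
        · simp only [List.filter_cons, hpa', hqa, Bool.false_eq_true, if_false, if_true,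
            List.length_cons]
          omega
        · have hqa' : q a = false := by simpa using hqa
          rw [List.filter_cons, List.filter_cons, hpa', hqa']
          exact hlt

lemma canon_length_lt (reach l l' : List String) (h : Canon reach l) (h' : Canon reach l')
    (hsub : ∀ x ∈ l, x ∈ l') (hne : l ≠ l') : l.length < l'.length := by
  have hw : ∃ w, w ∈ l' ∧ w ∉ l := by
    by_contra hc
    push_neg at hc
    exact hne (canon_eq_of_mem_iff reach l l' h h' (fun x => ⟨hsub x, fun hx => hc x hx⟩))
  obtain ⟨w, hwl', hwl⟩ := hw
  rw [← h, ← h']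
  refine filter_length_lt reach _ _ ?_ (canon_mem reach l' h' hwl') ?_ ?_
  · intro a hpa
    have : a ∈ l := by simpa using hpa
    simpa using hsub a this
  · simpa using hwl'
  · simpa using hwl

-- ---------- dict-shape helpers ----------
lemma getD_foldl_insert_fn {ν : Type} (f : String → ν) (dflt : ν) :
    ∀ (l : List String) (a : PySem.Dict String ν) (x : String),
      (l.foldl (fun a k => a.insert k (f k)) a).getD x dflt =
        if x ∈ l then f x else a.getD x dflt := by
  intro l
  induction l with
  | nil => intro a x; simp
  | cons k t ih =>
    intro a x
    rw [List.foldl_cons, ih]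
    by_cases hxt : x ∈ t
    · simp [hxt]
    · rw [if_neg hxt, PySem.Dict.getD_insert]
      by_cases hxk : x = k
      · simp [hxk]
      · simp [hxk, hxt]

lemma keys_foldl_insert_fn {ν : Type} (f : String → ν) (l : List String) (hl : l.Nodup) :
    (l.foldl (fun a k => a.insert k (f k)) PySem.Dict.empty).keys = l := by
  have h := PySem.Dict.keys_foldl_insert l (fun _ k => f k) PySem.Dict.empty
  rw [h, PySem.Dict.keys_empty, PySem.Set.update_nil_left,
    PySem.Set.ofList_eq_self_of_nodup l hl]

lemma items_foldl_insert_fn {ν : Type} (f : String → ν) (l : List String) (hl : l.Nodup) :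
    (l.foldl (fun a k => a.insert k (f k)) PySem.Dict.empty).items =
      l.map (fun k => (k, f k)) := by
  induction l using List.reverseRecOn with
  | nil => simp [PySem.Dict.empty]
  | append_singleton t k ih =>
    have hnd : t.Nodup ∧ k ∉ t := by
      constructor
      · exact hl.sublist (List.sublist_append_left t [k])
      · intro hk
        have := List.disjoint_of_nodup_append hl
        exact this hk (List.mem_singleton_self k)
    rw [List.foldl_append, List.foldl_cons, List.foldl_nil]
    have hcontains : (t.foldl (fun a k => a.insert k (f k)) PySem.Dict.empty).contains k
        = false := by
      rw [← Bool.not_eq_true, PySem.Dict.contains_iff_mem_keys,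
        keys_foldl_insert_fn f t hnd.1]
      exact hnd.2
    rw [PySem.Dict.items_insert_of_not_contains _ _ hcontains, ih hnd.1, List.map_append,
      List.map_singleton]

lemma items_eq_keys_map (d : PySem.Dict String (List String)) (hk : d.keys.Nodup) :
    d.items = d.keys.map (fun k => (k, d.getD k [])) := by
  have hkeys : d.keys = d.items.map Prod.fst := rfl
  rw [hkeys, List.map_map]
  have : ∀ p ∈ d.items, ((fun k => (k, d.getD k [])) ∘ Prod.fst) p = id p := by
    rintro ⟨k, v⟩ hp
    simp only [Function.comp_apply, id_eq]
    rw [PySem.Dict.getD_of_mem_items d hp hk]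
  rw [List.map_congr_left this, List.map_id]

-- ---------- the Gauss–Seidel pass: invariant and measure ----------
def SigmaD (reach : List String) (dom : PySem.Dict String (List String)) : Nat :=
  (reach.map (fun n => (dom.getD n []).length)).sum

def prednOf (pr : PySem.Dict String (List String)) (reach : List String) (n : String) :
    List String :=
  (pr.getD n []).filter (fun p => reach.contains p)

def InvA (cfgd : PySem.Dict String (List String)) (entry : String) (reach : List String)
    (pr : PySem.Dict String (List String)) (dom : PySem.Dict String (List String)) : Prop :=
  dom.keys = reach ∧
  dom.getD entry [] = [entry] ∧
  (∀ n ∈ reach, Canon reach (dom.getD n [])) ∧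
  (∀ n ∈ reach, n ≠ entry → ∀ x, x ∈ pvNewDom reach (prednOf pr reach n) dom n →
    x ∈ dom.getD n []) ∧
  (∀ n ∈ reach, ∀ x, PD cfgd entry n x → x ∈ dom.getD n [])

lemma newdom_subset_reach (reach predsn : List String) (dom : PySem.Dict String (List String))
    (n : String) (hn : n ∈ reach) : ∀ x ∈ pvNewDom reach predsn dom n, x ∈ reach := by
  intro x hx
  unfold pvNewDom at hx
  split at hx
  · have : x = n := by simpa using hx
    exact this ▸ hn
  · exact (List.mem_filter.1 hx).1

lemma newdom_canon (reach predsn : List String) (hnd : reach.Nodup)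
    (dom : PySem.Dict String (List String)) (n : String) (hn : n ∈ reach) :
    Canon reach (pvNewDom reach predsn dom n) := by
  unfold pvNewDom
  split
  · exact canon_singleton reach hnd hn
  · exact canon_filter reach _

lemma newdom_mono (reach predsn : List String) (d1 d2 : PySem.Dict String (List String))
    (n : String) (h : ∀ p, ∀ x, x ∈ d1.getD p [] → x ∈ d2.getD p []) :
    ∀ x ∈ pvNewDom reach predsn d1 n, x ∈ pvNewDom reach predsn d2 n := by
  intro x hx
  unfold pvNewDom at hx ⊢
  split at hx
  · rename_i hempty
    rw [if_pos hempty]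
    exact hx
  · rename_i hempty
    rw [if_neg hempty]
    obtain ⟨hxr, hcond⟩ := List.mem_filter.1 hx
    refine List.mem_filter.2 ⟨hxr, ?_⟩
    rcases Bool.or_eq_true_iff.1 hcond with hc | hc
    · exact Bool.or_eq_true_iff.2 (Or.inl hc)
    · refine Bool.or_eq_true_iff.2 (Or.inr ?_)
      rw [List.all_eq_true] at hc ⊢
      intro p hp
      have := hc p hp
      simp only [List.contains_eq_mem, decide_eq_true_eq] at this ⊢
      exact h p x this

lemma sigma_insert (reach : List String) (hnd : reach.Nodup)
    (dom : PySem.Dict String (List String)) {n : String} (hn : n ∈ reach) (v : List String) :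
    SigmaD reach (dom.insert n v) + (dom.getD n []).length
      = SigmaD reach dom + v.length := by
  induction reach with
  | nil => simp at hn
  | cons a t ih =>
    obtain ⟨ha, hndt⟩ := List.nodup_cons.1 hnd
    unfold SigmaD
    rw [List.map_cons, List.map_cons, List.sum_cons, List.sum_cons]
    rcases List.mem_cons.1 hn with rfl | hnt
    · rw [PySem.Dict.getD_insert]
      rw [if_pos rfl]
      have hmap : t.map (fun m => ((dom.insert n v).getD m []).length) =
          t.map (fun m => (dom.getD m []).length) := by
        apply List.map_congr_left
        intro m hm
        have hne : ¬(m = n) := fun h => ha (by rw [← h]; exact hm)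
        rw [PySem.Dict.getD_insert, if_neg hne]
      rw [hmap]
      omega
    · have hne : ¬(a = n) := fun h => ha (by rw [h]; exact hnt)
      rw [PySem.Dict.getD_insert, if_neg hne]
      have := ih hndt hnt
      unfold SigmaD at this
      omega

lemma prednOf_char (cfgd : PySem.Dict String (List String)) (hk : cfgd.keys.Nodup)
    (entry : String) (reach : List String) (hreach : reach = reachableD cfgd entry)
    (n p : String) :
    p ∈ prednOf (predsD cfgd) reach n ↔ EdgeG cfgd p n ∧ p ∈ reach := by
  unfold prednOf
  rw [List.mem_filter]
  constructor
  · rintro ⟨h1, h2⟩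
    exact ⟨(mem_predsD_getD cfgd hk p n).1 h1, by simpa using h2⟩
  · rintro ⟨h1, h2⟩
    exact ⟨(mem_predsD_getD cfgd hk p n).2 h1, by simpa using h2⟩

lemma predn_ne_nil (cfgd : PySem.Dict String (List String)) (hk : cfgd.keys.Nodup)
    (entry : String) (reach : List String) (hreach : reach = reachableD cfgd entry)
    (n : String) (hn : n ∈ reach) (hne : n ≠ entry) :
    (prednOf (predsD cfgd) reach n).isEmpty = false := by
  have hrtg : Relation.ReflTransGen (EdgeG cfgd) entry n := by
    rw [← mem_reachableD cfgd hk, ← hreach]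
    exact hn
  rcases Relation.ReflTransGen.cases_tail hrtg with heq | ⟨c, hrc, hedge⟩
  · exact absurd heq hne
  · have hcr : c ∈ reach := by
      rw [hreach, mem_reachableD cfgd hk]
      exact hrc
    have hmem : c ∈ prednOf (predsD cfgd) reach n :=
      (prednOf_char cfgd hk entry reach hreach n c).2 ⟨hedge, hcr⟩
    rw [List.isEmpty_eq_false_iff_exists_mem]
    exact ⟨c, hmem⟩

lemma PD_in_newdom (cfgd : PySem.Dict String (List String)) (hk : cfgd.keys.Nodup)
    (entry : String) (reach : List String) (hreach : reach = reachableD cfgd entry)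
    (dom : PySem.Dict String (List String))
    (hP : ∀ m ∈ reach, ∀ y, PD cfgd entry m y → y ∈ dom.getD m [])
    (n : String) (hn : n ∈ reach) (hne : n ≠ entry)
    (x : String) (hx : PD cfgd entry n x) :
    x ∈ pvNewDom reach (prednOf (predsD cfgd) reach n) dom n := by
  have hxr : x ∈ reach := by rw [hreach]; exact hx.1
  unfold pvNewDom
  rw [predn_ne_nil cfgd hk entry reach hreach n hn hne]
  simp only [Bool.false_eq_true, if_false]
  refine List.mem_filter.2 ⟨hxr, ?_⟩
  by_cases hxn : x = n
  · simp [hxn]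
  · refine Bool.or_eq_true_iff.2 (Or.inr ?_)
    rw [List.all_eq_true]
    intro p hp
    obtain ⟨hedge, hpr⟩ := (prednOf_char cfgd hk entry reach hreach n p).1 hp
    have hpd : PD cfgd entry p x :=
      PD_pred cfgd hk entry n x p hx hxn hedge (by rw [← hreach]; exact hpr)
    have := hP p hpr x hpd
    simp only [List.contains_eq_mem, decide_eq_true_eq]
    exact this

-- one step of the pass preserves the invariant; it either leaves acc unchanged or
-- strictly decreases the measure and raises the flag
lemma step_spec (cfgd : PySem.Dict String (List String)) (hk : cfgd.keys.Nodup)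
    (entry : String)
    (reach : List String) (hreach : reach = reachableD cfgd entry)
    (pr : PySem.Dict String (List String)) (hpr : pr = predsD cfgd)
    (n : String) (hn : n ∈ reach)
    (acc : PySem.Dict String (List String) × Bool) (hInv : InvA cfgd entry reach pr acc.1) :
    InvA cfgd entry reach pr (pvStep reach entry pr acc n).1 ∧
    (pvStep reach entry pr acc n = acc ∨
      ((pvStep reach entry pr acc n).2 = true ∧
        SigmaD reach (pvStep reach entry pr acc n).1 < SigmaD reach acc.1)) ∧
    (pvStep reach entry pr acc n = acc → n ≠ entry →
      acc.1.getD n [] = pvNewDom reach (prednOf pr reach n) acc.1 n) := by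
  have hstep_eq : pvStep reach entry pr acc n =
      if (n == entry) = true then acc
      else if (acc.1.getD n [] == pvNewDom reach (prednOf pr reach n) acc.1 n) = true then acc
      else (acc.1.insert n (pvNewDom reach (prednOf pr reach n) acc.1 n), true) := rfl
  by_cases hne : (n == entry) = true
  · rw [hstep_eq, if_pos hne]
    exact ⟨hInv, Or.inl rfl, fun _ h => absurd (beq_iff_eq.1 hne) h⟩
  · rw [hstep_eq, if_neg hne]
    have hnentry : n ≠ entry := fun h => hne (beq_iff_eq.2 h)
    by_cases heq : (acc.1.getD n [] == pvNewDom reach (prednOf pr reach n) acc.1 n) = true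
    · rw [if_pos heq]
      exact ⟨hInv, Or.inl rfl, fun _ _ => beq_iff_eq.1 heq⟩
    · rw [if_neg heq]
      obtain ⟨hkeys, hentry, hcanon, hpre, hP⟩ := hInv
      have hnd : reach.Nodup := hreach ▸ nodup_reachableD cfgd hk entry
      set new := pvNewDom reach (prednOf pr reach n) acc.1 n with hnewdef
      have hsub : ∀ x ∈ new, x ∈ acc.1.getD n [] := hpre n hn hnentry
      have hne_lists : new ≠ acc.1.getD n [] := fun h => heq (beq_iff_eq.2 h.symm)
      have hnewcanon : Canon reach new := newdom_canon reach _ hnd acc.1 n hn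
      have hlt : new.length < (acc.1.getD n []).length :=
        canon_length_lt reach new _ hnewcanon (hcanon n hn) hsub hne_lists
      have hsig := sigma_insert reach hnd acc.1 hn new
      have hcontains : acc.1.contains n = true := by
        rw [PySem.Dict.contains_iff_mem_keys, hkeys]
        exact hn
      have hmono_ins : ∀ p y, y ∈ (acc.1.insert n new).getD p [] → y ∈ acc.1.getD p [] := by
        intro p y
        rw [PySem.Dict.getD_insert]
        split
        · rename_i hpn
          subst hpn
          intro h
          exact hsub y h
        · exact id
      refine ⟨?_, Or.inr ⟨rfl, by
        show SigmaD reach (acc.1.insert n new) < SigmaD reach acc.1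
        omega⟩, ?_⟩
      · refine ⟨?_, ?_, ?_, ?_, ?_⟩
        · rw [PySem.Dict.keys_insert_of_contains acc.1 new hcontains]
          exact hkeys
        · rw [PySem.Dict.getD_insert, if_neg (fun h : entry = n => hnentry h.symm)]
          exact hentry
        · intro m hm
          rw [PySem.Dict.getD_insert]
          split
          · exact hnewcanon
          · exact hcanon m hm
        · intro m hm hmne x hx
          have hx' : x ∈ pvNewDom reach (prednOf pr reach m) acc.1 m :=
            newdom_mono reach _ _ acc.1 m hmono_ins x hx
          rw [PySem.Dict.getD_insert]
          split
          · rename_i hmn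
            subst hmn
            exact hx'
          · exact hpre m hm hmne x hx'
        · intro m hm x hx
          rw [PySem.Dict.getD_insert]
          split
          · rename_i hmn
            subst hmn
            rw [hnewdef, hpr]
            exact PD_in_newdom cfgd hk entry reach hreach acc.1
              (fun m' hm' y hy => hP m' hm' y hy) m hm
              (fun h => hne (beq_iff_eq.2 h)) x hx
          · exact hP m hm x hx
      · intro habs
        exfalso
        have : (acc.1.insert n new, true).1.getD n [] = acc.1.getD n [] := by
          rw [habs]
        rw [PySem.Dict.getD_insert, if_pos rfl] at this
        exact hne_lists this

lemma fold_pass (cfgd : PySem.Dict String (List String)) (hk : cfgd.keys.Nodup)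
    (entry : String)
    (reach : List String) (hreach : reach = reachableD cfgd entry)
    (pr : PySem.Dict String (List String)) (hpr : pr = predsD cfgd) :
    ∀ (l : List String), (∀ n ∈ l, n ∈ reach) →
      ∀ acc, InvA cfgd entry reach pr acc.1 →
      InvA cfgd entry reach pr (l.foldl (pvStep reach entry pr) acc).1 ∧
      ((l.foldl (pvStep reach entry pr) acc).2 = false →
        l.foldl (pvStep reach entry pr) acc = acc ∧
        (∀ n ∈ l, n ≠ entry →
          acc.1.getD n [] = pvNewDom reach (prednOf pr reach n) acc.1 n)) ∧
      SigmaD reach (l.foldl (pvStep reach entry pr) acc).1 ≤ SigmaD reach acc.1 ∧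
      ((l.foldl (pvStep reach entry pr) acc).2 = true →
        acc.2 = true ∨
          SigmaD reach (l.foldl (pvStep reach entry pr) acc).1 < SigmaD reach acc.1) := by
  intro l
  induction l with
  | nil =>
    intro _ acc hInv
    exact ⟨hInv, fun _ => ⟨rfl, by simp⟩, le_refl _, fun h => Or.inl h⟩
  | cons n t ih =>
    intro hl acc hInv
    have hn : n ∈ reach := hl n List.mem_cons_self
    have ht : ∀ m ∈ t, m ∈ reach := fun m hm => hl m (List.mem_cons_of_mem n hm)
    obtain ⟨hInv', hstep, hfix⟩ := step_spec cfgd hk entry reach hreach pr hpr n hn acc hInv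
    rw [List.foldl_cons]
    obtain ⟨ihInv, ihfalse, ihle, ihtrue⟩ := ih ht (pvStep reach entry pr acc n) hInv'
    refine ⟨ihInv, ?_, ?_, ?_⟩
    · intro hres
      obtain ⟨hres_eq, hres_all⟩ := ihfalse hres
      rcases hstep with hacc | ⟨hflag, _⟩
      · refine ⟨by rw [hres_eq, hacc], ?_⟩
        intro m hm hmne
        rcases List.mem_cons.1 hm with rfl | hmt
        · exact hfix hacc hmne
        · have := hres_all m hmt hmne
          rw [hacc] at this
          exact this
      · exfalso
        rw [hres_eq] at hres
        rw [hres] at hflag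
        exact Bool.false_ne_true hflag
    · have hstep_le : SigmaD reach (pvStep reach entry pr acc n).1 ≤ SigmaD reach acc.1 := by
        rcases hstep with hacc | ⟨_, hlt⟩
        · rw [hacc]
        · exact le_of_lt hlt
      exact le_trans ihle hstep_le
    · intro htrue
      rcases hstep with hacc | ⟨hflag, hlt⟩
      · rcases ihtrue htrue with h | h
        · rw [hacc] at h
          exact Or.inl h
        · rw [hacc] at h ⊢
          exact Or.inr h
      · exact Or.inr (lt_of_le_of_lt ihle hlt)

lemma loop_spec (cfgd : PySem.Dict String (List String)) (hk : cfgd.keys.Nodup)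
    (entry : String)
    (reach : List String) (hreach : reach = reachableD cfgd entry)
    (pr : PySem.Dict String (List String)) (hpr : pr = predsD cfgd) :
    ∀ (fuel : Nat) (dom : PySem.Dict String (List String)),
      InvA cfgd entry reach pr dom → SigmaD reach dom < fuel →
      InvA cfgd entry reach pr (pvLoop reach entry pr fuel dom) ∧
      (∀ n ∈ reach, n ≠ entry →
        (pvLoop reach entry pr fuel dom).getD n [] =
          pvNewDom reach (prednOf pr reach n)
            (pvLoop reach entry pr fuel dom) n) := by
  intro fuel
  induction fuel with
  | zero =>
    intro dom hInv hσ
    exact absurd hσ (Nat.not_lt_zero _)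
  | succ f ih =>
    intro dom hInv hσ
    obtain ⟨hInvf, hfalse, hle, htrue⟩ :=
      fold_pass cfgd hk entry reach hreach pr hpr reach (fun n hn => hn) (dom, false) hInv
    set st := reach.foldl (pvStep reach entry pr) (dom, false) with hstdef
    have hloop_eq : pvLoop reach entry pr (f + 1) dom =
        if st.2 then pvLoop reach entry pr f st.1 else st.1 := rfl
    by_cases hflag : st.2 = true
    · rw [hloop_eq, if_pos hflag]
      have hlt : SigmaD reach st.1 < SigmaD reach dom := by
        rcases htrue hflag with h | h
        · exact absurd h (by simp)
        · exact h
      exact ih st.1 hInvf (by omega)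
    · rw [hloop_eq, if_neg hflag]
      obtain ⟨hst_eq, hall⟩ := hfalse (by simpa using hflag)
      have h1 : st.1 = dom := by rw [hst_eq]
      rw [h1]
      exact ⟨hInv, hall⟩

lemma dominators_eq (cfg : List (String × List String)) (entry : String) :
    dominators cfg entry = dominators_alt cfg entry := by
  unfold dominators dominators_alt
  set cfgd := PySem.Dict.ofList cfg with hcfgd
  have hk : cfgd.keys.Nodup := PySem.Dict.nodup_keys_ofList cfg
  set reach := reachableD cfgd entry with hreachdef
  have hreach' : reach = reachableD cfgd entry := hreachdef
  have hnd : reach.Nodup := hreachdef ▸ nodup_reachableD cfgd hk entry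
  have hentrymem : entry ∈ reach := hreachdef ▸ entry_mem_reachableD cfgd hk entry
  set pr := predsD cfgd with hprdef
  set dom0 := reach.foldl
    (fun d n => d.insert n (if n == entry then [entry] else reach)) PySem.Dict.empty
    with hdom0def
  set avoid := reach.foldl
    (fun a d => a.insert d (reachableD (withoutD cfgd d) entry)) PySem.Dict.empty
    with havoiddef
  set r := pvLoop reach entry pr (reach.length * reach.length + 1) dom0 with hrdef
  -- characterisation of dom0
  have hdom0getD : ∀ x, dom0.getD x [] =
      if x ∈ reach then (if x == entry then [entry] else reach) else [] := by
    intro x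
    rw [hdom0def, getD_foldl_insert_fn (fun n => if n == entry then [entry] else reach) []]
    split
    · rfl
    · rfl
  -- the invariant holds initially
  have hInv0 : InvA cfgd entry reach pr dom0 := by
    refine ⟨?_, ?_, ?_, ?_, ?_⟩
    · rw [hdom0def]
      exact keys_foldl_insert_fn _ reach hnd
    · rw [hdom0getD entry, if_pos hentrymem]
      simp
    · intro n hn
      rw [hdom0getD n, if_pos hn]
      by_cases hne : (n == entry) = true
      · rw [if_pos hne]
        have : n = entry := beq_iff_eq.1 hne
        exact canon_singleton reach hnd (this ▸ hn)
      · rw [if_neg hne]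
        exact canon_self reach
    · intro n hn hne x hx
      rw [hdom0getD n, if_pos hn, if_neg (by simpa using hne)]
      exact newdom_subset_reach reach _ dom0 n hn x hx
    · intro n hn x hx
      rw [hdom0getD n, if_pos hn]
      by_cases hne : (n == entry) = true
      · rw [if_pos hne]
        have hnentry : n = entry := beq_iff_eq.1 hne
        rw [hnentry] at hx
        have hxe := (PD_entry_iff cfgd hk entry x).1 hx
        simp [hxe]
      · rw [if_neg hne]
        rw [hreach']
        exact hx.1
  -- the measure is within the fuel
  have hσ0 : SigmaD reach dom0 < reach.length * reach.length + 1 := by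
    unfold SigmaD
    have hbound : ∀ y ∈ reach.map (fun n => (dom0.getD n []).length), y ≤ reach.length := by
      intro y hy
      obtain ⟨n, hn, rfl⟩ := List.mem_map.1 hy
      rw [hdom0getD n, if_pos hn]
      by_cases hne : (n == entry) = true
      · rw [if_pos hne]
        have : 0 < reach.length := List.length_pos_of_mem hentrymem
        simpa using this
      · rw [if_neg hne]
    have hsum := List.sum_le_card_nsmul _ reach.length hbound
    rw [List.length_map, smul_eq_mul] at hsum
    omega
  obtain ⟨hInvR, hfixR⟩ :=
    loop_spec cfgd hk entry reach hreach' pr hprdef (reach.length * reach.length + 1)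
      dom0 hInv0 hσ0
  rw [← hrdef] at hInvR hfixR
  obtain ⟨hkeysR, hentryR, hcanonR, hpreR, hPR⟩ := hInvR
  -- the avoid dict caches the deleted-node reachability
  have havoid : ∀ d ∈ reach, avoid.getD d [] = reachableD (withoutD cfgd d) entry := by
    intro d hd
    rw [havoiddef, getD_foldl_insert_fn (fun d => reachableD (withoutD cfgd d) entry) [],
      if_pos hd]
  -- the per-node dominator sets agree
  have hvals : ∀ n ∈ reach, r.getD n [] =
      reach.filter (fun d => d == n || !((avoid.getD d []).contains n)) := by
    intro n hn
    have hstep1 : reach.filter (fun d => d == n || !((avoid.getD d []).contains n)) =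
        reach.filter
          (fun d => d == n || !((reachableD (withoutD cfgd d) entry).contains n)) := by
      apply List.filter_congr
      intro d hd
      rw [havoid d hd]
    rw [hstep1]
    by_cases hne : n = entry
    · rw [hne, hentryR]
      have hstep2 : reach.filter
          (fun d => d == entry || !((reachableD (withoutD cfgd d) entry).contains entry)) =
          reach.filter (fun d => d == entry) := by
        apply List.filter_congr
        intro d _
        have hmem : entry ∈ reachableD (withoutD cfgd d) entry :=
          entry_mem_reachableD _ (keys_nodup_withoutD cfgd hk d) entry
        have hcon : PySem.Set.contains (reachableD (withoutD cfgd d) entry) entry = true :=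
          (PySem.Set.contains_iff _ _).2 hmem
        rw [hcon]
        simp
      rw [hstep2, filter_beq_nodup reach hnd hentrymem]
    · -- membership in the loop result is the path-based dominance predicate
      have hmemL : ∀ x, x ∈ r.getD n [] ↔ PD cfgd entry n x := by
        intro x
        constructor
        · intro hx
          have hxr : x ∈ reach := canon_mem reach _ (hcanonR n hn) hx
          by_cases hxn : x = n
          · subst hxn
            exact PD_self cfgd hk entry x (hreach' ▸ hxr)
          · refine ⟨hreach' ▸ hxr, Or.inr ?_⟩
            intro hmem
            rw [mem_reachableD _ (keys_nodup_withoutD cfgd hk x)] at hmem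
            have hXe : ∀ y, y ∈ r.getD entry [] → y = entry := by
              rw [hentryR]
              intro y hy
              simpa using hy
            have hXfix : ∀ m, m ∈ reachableD cfgd entry → m ≠ entry →
                ∀ y, y ∈ r.getD m [] →
                  y = m ∨ (∀ p, EdgeG cfgd p m → p ∈ reachableD cfgd entry →
                    y ∈ r.getD p []) := by
              intro m hm hmne y hy
              rw [hfixR m (hreach' ▸ hm) hmne] at hy
              unfold pvNewDom at hy
              split at hy
              · exact Or.inl (by simpa using hy)
              · obtain ⟨hyr, hcond⟩ := List.mem_filter.1 hy
                rcases Bool.or_eq_true_iff.1 hcond with hc | hc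
                · exact Or.inl (beq_iff_eq.1 hc)
                · refine Or.inr ?_
                  intro p hedge hpreach
                  have hp : p ∈ prednOf pr reach m := by
                    rw [hprdef]
                    exact (prednOf_char cfgd hk entry reach hreach' m p).2
                      ⟨hedge, hreach' ▸ hpreach⟩
                  have := (List.all_eq_true.1 hc) p hp
                  simp only [List.contains_eq_mem, decide_eq_true_eq] at this
                  exact this
            have := below_P cfgd hk entry x (fun m => r.getD m []) hXe hXfix n hmem
              (hreach' ▸ hn) hx
            exact hxn this
        · exact hPR n hn x
      have hmemR : ∀ x, x ∈ reach.filter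
          (fun d => d == n || !((reachableD (withoutD cfgd d) entry).contains n)) ↔
          PD cfgd entry n x := by
        intro x
        rw [List.mem_filter]
        constructor
        · rintro ⟨hxr, hcond⟩
          refine ⟨hreach' ▸ hxr, ?_⟩
          rcases Bool.or_eq_true_iff.1 hcond with hc | hc
          · exact Or.inl (beq_iff_eq.1 hc)
          · refine Or.inr ?_
            intro hmem
            rw [(PySem.Set.contains_iff _ _).2 hmem] at hc
            simp at hc
        · rintro ⟨hxr, hor⟩
          refine ⟨hreach' ▸ hxr, ?_⟩
          rcases hor with h | h
          · exact Bool.or_eq_true_iff.2 (Or.inl (beq_iff_eq.2 h))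
          · refine Bool.or_eq_true_iff.2 (Or.inr ?_)
            have hcf : PySem.Set.contains (reachableD (withoutD cfgd x) entry) n = false := by
              cases hcb : PySem.Set.contains (reachableD (withoutD cfgd x) entry) n
              · rfl
              · exact absurd ((PySem.Set.contains_iff _ _).1 hcb) h
            rw [hcf]
            rfl
      exact canon_eq_of_mem_iff reach _ _ (hcanonR n hn) (canon_filter reach _)
        (fun x => (hmemL x).trans (hmemR x).symm)
  -- assemble both item lists
  have hkeysnodupR : r.keys.Nodup := by rw [hkeysR]; exact hnd
  rw [items_eq_keys_map r hkeysnodupR, hkeysR,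
    items_foldl_insert_fn
      (fun n => reach.filter (fun d => d == n || !((avoid.getD d []).contains n))) reach hnd]
  apply List.map_congr_left
  intro n hn
  rw [hvals n hn]

-- ===== VERDICT (by name: the statement is the Claim_ definition above) =====
theorem dominators_spec : Claim_equal_dominators := by
  intro cfg entry _
  exact dominators_eq cfg entry
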